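-- pv_equiv track=rewrite | github.com/ncreighton/empire-infrastructure | grimoire-intelligence/grimoire/knowledge/numerology.py | reduce_to_single
-- ===== SOURCE A (Python) =====
-- def reduce_to_single(number: int) -> int:
--     """Reduce a number to a single digit (1-9) or master number (11, 13).
--     Standard numerological reduction, preserving 11 and 13 as master numbers.
--     """
--     if number in (11, 13):
--         return number
--     while number > 9:
--         number = sum(int(d) for d in str(number))
--         if number in (11, 13):
--             return number
--     return number
-- ===== SOURCE B (Python) =====
-- def reduce_to_single(number: int) -> int:
--     """Reduce a number to a single digit (1-9) or master number (11, 13)."""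
--     if number in (11, 13) or number <= 9:
--         return number
--     s = 0
--     n = number
--     while n > 0:
--         s += n % 10
--         n //= 10
--     return reduce_to_single(s)
-- ===== Notes on version B (the rewrite author's own statement) =====
-- stated objective: alternative
-- what changed: B replaces A's iterative loop that re-converts the number to a string and sums the digit characters with a recursive reduction whose digit sum is computed purely arithmetically via modulus and floor division.
import Mathlib
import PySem

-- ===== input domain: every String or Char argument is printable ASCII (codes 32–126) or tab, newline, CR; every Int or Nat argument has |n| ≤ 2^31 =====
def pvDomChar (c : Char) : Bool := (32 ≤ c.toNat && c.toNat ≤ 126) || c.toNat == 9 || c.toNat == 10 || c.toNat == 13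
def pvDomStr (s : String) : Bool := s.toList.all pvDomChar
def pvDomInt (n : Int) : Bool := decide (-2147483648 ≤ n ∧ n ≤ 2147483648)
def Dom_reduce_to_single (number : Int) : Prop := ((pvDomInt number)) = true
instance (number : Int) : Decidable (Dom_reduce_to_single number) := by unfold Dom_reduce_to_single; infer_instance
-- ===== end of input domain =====

-- B replaces A's iterative loop that re-converts the number to a string and sums
-- int(d) per character by a recursive reduction whose digit sum is pure integer
-- arithmetic (% 10 and // 10) (objective: alternative).

-- ===== PORT A =====

-- int(d) for a single character d (only digit characters ever reach it in A,
-- where ofChars? returns some; getD 0 is exact on those)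
def pvCharInt (d : Char) : Int := (PySem.Int.ofChars? [d]).getD 0

-- sum(int(d) for d in str(number))
def pvSds (n : Int) : Int := ((PySem.Int.toChars n).map pvCharInt).sum

-- the while loop of A: `while number > 9: number = sum(...); if number in (11,13):
-- return number`.  The Nat argument is pure fuel making the recursion structural;
-- reduce_to_single passes enough of it (the digit sum of n > 9 is < n, proved in
-- pvSds_lt below), so the fuel-exhausted branch is never taken.
def pvLoopA : Nat → Int → Int
  | 0, n => n
  | f + 1, n =>
    if 9 < n then
      let m := pvSds n
      if m = 11 ∨ m = 13 then m else pvLoopA f m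
    else n

def reduce_to_single (number : Int) : Int :=
  if number = 11 ∨ number = 13 then number
  else pvLoopA (number.toNat + 1) number

-- ===== PORT B =====

-- `s = 0; while n > 0: s += n % 10; n //= 10` — fuel-structural for the same
-- reason (n // 10 has smaller toNat than n > 0, so n.toNat + 1 steps suffice)
def pvDigitSumB : Nat → Int → Int → Int
  | 0, _, s => s
  | f + 1, n, s =>
    if 0 < n then pvDigitSumB f (PySem.Int.floordiv n 10) (s + PySem.Int.mod n 10)
    else s

-- the recursion of B, fuel-structural as above
def pvAltB : Nat → Int → Int
  | 0, n => n
  | f + 1, n =>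
    if n = 11 ∨ n = 13 ∨ n ≤ 9 then n
    else pvAltB f (pvDigitSumB (n.toNat + 1) n 0)

def reduce_to_single_alt (number : Int) : Int := pvAltB (number.toNat + 1) number

-- ===== PRECONDITION & SPEC =====
def Spec_reduce_to_single (number : Int) (out : Int) : Prop := out = reduce_to_single_alt number
instance (number : Int) (out : Int) : Decidable (Spec_reduce_to_single number out) := by unfold Spec_reduce_to_single; infer_instance

-- ===== CLAIM (what is proved, stated in full; the proofs are below) =====
def Claim_equal_reduce_to_single : Prop := ∀ (number : Int), Dom_reduce_to_single number → Spec_reduce_to_single number (reduce_to_single number)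

-- ===== LEMMAS AND PROOFS =====

-- arithmetic digit sum (proof-side reference value)
def pvDsN (n : Nat) : Nat := if n < 10 then n else n % 10 + pvDsN (n / 10)

theorem pvDsN_le (n : Nat) : pvDsN n ≤ n := by
  induction n using Nat.strong_induction_on with
  | _ n ih =>
    rw [pvDsN]
    split
    · omega
    · have h1 : n / 10 < n := by omega
      have := ih (n / 10) h1
      omega

theorem pvCharInt_digitChar (k : Nat) (hk : k < 10) :
    pvCharInt (Nat.digitChar k) = (k : Int) := by
  interval_cases k <;> decide

theorem pvSum_toDigitsCore (fuel : Nat) : ∀ (n : Nat) (ds : List Char), n < fuel →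
    ((Nat.toDigitsCore 10 fuel n ds).map pvCharInt).sum
      = (pvDsN n : Int) + ((ds.map pvCharInt).sum) := by
  induction fuel with
  | zero => intro n ds h; omega
  | succ fuel ih =>
    intro n ds h
    rw [Nat.toDigitsCore]
    split
    · rename_i h0
      have hn : n < 10 := by omega
      simp [List.map, List.sum_cons, pvCharInt_digitChar (n % 10) (by omega), pvDsN, hn]
      omega
    · rename_i h0
      have hn : ¬ n < 10 := by omega
      have hlt : n / 10 < fuel := by omega
      rw [ih (n / 10) (Nat.digitChar (n % 10) :: ds) hlt]
      simp only [List.map, List.sum_cons, pvCharInt_digitChar (n % 10) (by omega)]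
      conv_rhs => rw [pvDsN]
      simp only [hn, if_false]
      push_cast
      ring

theorem pvSds_eq (n : Int) (hn : 0 ≤ n) : pvSds n = (pvDsN n.toNat : Int) := by
  have h : ¬ n < 0 := by omega
  rw [pvSds, PySem.Int.toChars]
  simp only [h, if_false]
  rw [Nat.toDigits, pvSum_toDigitsCore (n.toNat + 1) n.toNat [] (by omega)]
  simp

theorem pvSds_lt (n : Int) (hn : 9 < n) : pvSds n < n := by
  rw [pvSds_eq n (by omega)]
  have h10 : ¬ n.toNat < 10 := by omega
  rw [pvDsN]
  simp only [h10, if_false]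
  have := pvDsN_le (n.toNat / 10)
  omega

theorem pvSds_nonneg (n : Int) (hn : 9 < n) : 0 ≤ pvSds n := by
  rw [pvSds_eq n (by omega)]; positivity

theorem pvFdiv10 (n : Int) : Int.fdiv n 10 = n / 10 := by
  rw [Int.fdiv_eq_ediv]; simp

theorem pvFmod10 (n : Int) : Int.fmod n 10 = n % 10 := by
  rw [Int.fmod_eq_emod]; simp

theorem pvDigitSumB_eq (f : Nat) : ∀ (n s : Int), 0 ≤ n → n.toNat < f →
    pvDigitSumB f n s = s + (pvDsN n.toNat : Int) := by
  induction f with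
  | zero => intro n s h0 hf; omega
  | succ f ih =>
    intro n s h0 hf
    rw [pvDigitSumB]
    split
    · rename_i hpos
      have hd : PySem.Int.floordiv n 10 = (n.toNat / 10 : Nat) := by
        rw [PySem.Int.floordiv, pvFdiv10]
        omega
      have hm : PySem.Int.mod n 10 = (n.toNat % 10 : Nat) := by
        rw [PySem.Int.mod, pvFmod10]
        omega
      rw [hd, hm, ih ((n.toNat / 10 : Nat) : Int) _ (by positivity) (by simp; omega)]
      simp only [Int.toNat_natCast]
      conv_rhs => rw [pvDsN]
      split
      · rename_i hlt
        have : n.toNat / 10 = 0 := by omega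
        rw [this]
        simp [pvDsN]
        omega
      · push_cast; ring
    · rename_i hnpos
      have : n = 0 := by omega
      subst this
      simp [pvDsN]

-- the digit sum the two ports compute is the same value
theorem pvSds_eq_digitSumB (n : Int) (hn : 9 < n) :
    pvSds n = pvDigitSumB (n.toNat + 1) n 0 := by
  rw [pvSds_eq n (by omega), pvDigitSumB_eq (n.toNat + 1) n 0 (by omega) (by omega)]
  ring

theorem pvLoopA_eq_pvAltB (f : Nat) : ∀ (g : Nat) (n : Int), n.toNat < f → n.toNat < g →
    n ≠ 11 → n ≠ 13 → pvLoopA f n = pvAltB g n := by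
  induction f with
  | zero => intro g n hf; omega
  | succ f ih =>
    intro g n hf hg h11 h13
    obtain ⟨g', rfl⟩ : ∃ g', g = g' + 1 := ⟨g - 1, by omega⟩
    rw [pvLoopA, pvAltB]
    by_cases hgt : 9 < n
    · simp only [hgt, if_true, h11, h13, show ¬ n ≤ 9 by omega, or_false, if_false]
      rw [← pvSds_eq_digitSumB n hgt]
      have hlt := pvSds_lt n hgt
      have hnn := pvSds_nonneg n hgt
      by_cases hmaster : pvSds n = 11 ∨ pvSds n = 13
      · simp only [hmaster, if_true]
        obtain ⟨g'', rfl⟩ : ∃ g'', g' = g'' + 1 := ⟨g' - 1, by omega⟩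
        rw [pvAltB]
        rcases hmaster with h | h <;> simp [h]
      · simp only [hmaster, if_false]
        exact ih g' (pvSds n) (by omega) (by omega) (by tauto) (by tauto)
    · simp [hgt, show n ≤ 9 by omega]

-- ===== VERDICT (by name: the statement is the Claim_ definition above) =====
theorem reduce_to_single_spec : Claim_equal_reduce_to_single := by
  intro number _
  unfold Spec_reduce_to_single reduce_to_single reduce_to_single_alt
  split
  · rename_i h
    rw [pvAltB]
    rcases h with h | h <;> simp [h]
  · rename_i h
    simp only [not_or] at h
    exact pvLoopA_eq_pvAltB (number.toNat + 1) (number.toNat + 1) number (by omega) (by omega) h.1 h.2
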